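-- pv_equiv track=rewrite | github.com/FanchenBao/leetcode | LeetCode_2813.py | findMaximumElegance
-- ===== SOURCE A (Python) =====
-- from collections import Counter
-- from typing import List
--
-- def findMaximumElegance(items: List[List[int]], k: int) -> int:
--     """
--     An attempt of using Greedy.
--
--     Sort items and pick the last k as the initial elegance. Then we go
--     through each of the last k from the smallest profit to the largest.
--
--     If any item belongs to a category that has more than one item, it can
--     be replaced by the biggest remaining element that does not have a
--     category belonging to the last k. This guarantees that we are reducing
--     the smallest profit, adding the biggest remaining profit, and increasing
--     the number of unique count.
--
--     One thing to note is that when we add the new item, it must also be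
--     unique. Otherwise, we will not benefit from the increase of unique
--     count.
--
--     O(N), 1313 ms, faster than 39.19%
--     """
--     items.sort()
--     freq: Counter = Counter()
--     N = len(items)
--     eleg = 0
--     for i in range(N - k, N):
--         eleg += items[i][0]
--         freq[items[i][1]] += 1
--     eleg += len(freq) ** 2
--     res = eleg
--     i, j = N - k, N - k - 1
--     n = len(freq)  # original number of unique categories
--     while i < N and j >= 0:
--         if freq[items[i][1]] > 1:
--             while j >= 0 and items[j][1] in freq:
--                 j -= 1
--             if j >= 0 and freq[items[j][1]] == 0:
--                 eleg = eleg - items[i][0] + items[j][0] + 2 * n + 1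
--                 res = max(res, eleg)
--                 freq[items[i][1]] -= 1
--                 freq[items[j][1]] += 1
--                 j -= 1
--                 n += 1
--         i += 1
--     return res
-- ===== SOURCE B (Python) =====
-- from typing import List
--
-- def findMaximumElegance(items: List[List[int]], k: int) -> int:
--     """One descending pass with a stack of swappable duplicate profits and a set of
--     counted categories, instead of A's two-pointer Counter simulation.  Sorts
--     `items` in place like the original."""
--     items.sort()
--     if k <= 0:
--         return 0
--     rev = list(reversed(items))
--     total = 0
--     distinct = set()
--     dup = []
--     for it in rev[:k]:
--         total += it[0]
--         if it[1] in distinct: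
--             dup.append(it[0])
--         else:
--             distinct.add(it[1])
--     res = total + len(distinct) ** 2
--     for it in rev[k:]:
--         if it[1] not in distinct and dup:
--             total += it[0] - dup.pop()
--             distinct.add(it[1])
--             res = max(res, total + len(distinct) ** 2)
--     return res
-- ===== Notes on version B (the rewrite author's own statement) =====
-- stated objective: simpler
-- what changed: A simulates the greedy with two moving index pointers into the sorted array, a Counter of category multiplicities and a nested rescan loop; B makes one descending pass keeping only a set of counted categories and a stack of duplicate profits, swapping the stack top for each new-category item it meets.
-- outside the precondition, e.g. on findMaximumElegance([[1], [5, 2]], 1): A returns 6, B raises IndexError; on findMaximumElegance([[1, 2]], 2): A returns 3, B returns 2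
import Mathlib
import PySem

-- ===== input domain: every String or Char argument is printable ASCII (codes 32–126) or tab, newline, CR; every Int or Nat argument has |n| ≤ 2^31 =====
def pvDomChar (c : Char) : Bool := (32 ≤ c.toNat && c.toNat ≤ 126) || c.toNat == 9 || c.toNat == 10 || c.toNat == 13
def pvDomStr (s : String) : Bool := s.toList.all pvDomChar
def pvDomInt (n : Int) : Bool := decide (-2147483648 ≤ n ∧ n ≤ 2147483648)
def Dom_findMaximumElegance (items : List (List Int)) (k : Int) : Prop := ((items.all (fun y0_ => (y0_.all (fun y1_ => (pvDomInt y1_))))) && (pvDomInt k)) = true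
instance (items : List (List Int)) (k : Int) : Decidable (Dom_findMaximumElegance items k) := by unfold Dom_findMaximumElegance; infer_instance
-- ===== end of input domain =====

-- B replaces A's two-pointer swap simulation (Counter + nested rescan) by one
-- descending pass with a set of counted categories and a stack of duplicate
-- profits (objective: simpler). Both A and B sort `items` in place (same
-- observable mutation); the equivalence proved is about the return value.

-- ===== PORT A =====
-- items[i][1] / items[i][0] with Python (possibly negative, wrapping) index i
def pvCatA (s : List (List Int)) (i : Int) : Int := PySem.List.pyGetD (PySem.List.pyGetD s i []) 1 0
def pvProfA (s : List (List Int)) (i : Int) : Int := PySem.List.pyGetD (PySem.List.pyGetD s i []) 0 0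

-- inner `while j >= 0 and items[j][1] in freq: j -= 1`  (fuel = (j+1).toNat bounds the iterations exactly)
def pvScanJ (s : List (List Int)) (freq : PySem.Dict Int Int) : Nat → Int → Int
  | 0, j => j
  | fuel + 1, j => if 0 ≤ j ∧ freq.contains (pvCatA s j) then pvScanJ s freq fuel (j - 1) else j

-- outer `while i < N and j >= 0: …`  (fuel = (N-i).toNat: i increases by 1 each iteration)
def pvWhileA (s : List (List Int)) (N : Int) : Nat → PySem.Dict Int Int → Int → Int → Int → Int → Int → Int
  | 0, _, _, res, _, _, _ => res
  | fuel + 1, freq, eleg, res, n, i, j =>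
    if i < N ∧ 0 ≤ j then
      if 1 < freq.getD (pvCatA s i) 0 then
        let j' := pvScanJ s freq (j + 1).toNat j
        if 0 ≤ j' ∧ freq.getD (pvCatA s j') 0 = 0 then
          let eleg' := eleg - pvProfA s i + pvProfA s j' + 2 * n + 1
          let freq' := freq.insert (pvCatA s i) (freq.getD (pvCatA s i) 0 - 1)
          let freq'' := freq'.insert (pvCatA s j') (freq'.getD (pvCatA s j') 0 + 1)
          pvWhileA s N fuel freq'' eleg' (max res eleg') (n + 1) (i + 1) (j' - 1)
        else pvWhileA s N fuel freq eleg res n (i + 1) j'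
      else pvWhileA s N fuel freq eleg res n (i + 1) j
    else res

def findMaximumElegance (items : List (List Int)) (k : Int) : Int :=
  let s := PySem.List.sorted items (fun x => x) false
  let N : Int := s.length
  let p := (PySem.List.pyRange (N - k) N 1).foldl
      (fun (st : Int × PySem.Dict Int Int) i =>
        (st.1 + pvProfA s i, st.2.insert (pvCatA s i) (st.2.getD (pvCatA s i) 0 + 1)))
      (0, PySem.Dict.empty)
  let eleg := p.1 + (p.2.size : Int) ^ 2
  pvWhileA s N (N - (N - k)).toNat p.2 eleg eleg (p.2.size : Int) (N - k) (N - k - 1)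

-- ===== PORT B =====
def pvCat (it : List Int) : Int := PySem.List.pyGetD it 1 0
def pvProf (it : List Int) : Int := PySem.List.pyGetD it 0 0

def findMaximumElegance_alt (items : List (List Int)) (k : Int) : Int :=
  let s := PySem.List.sorted items (fun x => x) false
  if k ≤ 0 then 0
  else
    let rev := s.reverse
    let st1 := (PySem.List.slice rev none (some k)).foldl
      (fun (st : Int × PySem.Set Int × List Int) it =>
        if PySem.Set.contains st.2.1 (pvCat it) then
          (st.1 + pvProf it, st.2.1, st.2.2 ++ [pvProf it])
        else (st.1 + pvProf it, PySem.Set.add st.2.1 (pvCat it), st.2.2))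
      (0, PySem.Set.empty, [])
    let res0 := st1.1 + (st1.2.1.length : Int) ^ 2
    let fin := (PySem.List.slice rev (some k) none).foldl
      (fun (st : Int × PySem.Set Int × List Int × Int) it =>
        if ¬ PySem.Set.contains st.2.1 (pvCat it) ∧ st.2.2.1 ≠ [] then
          match PySem.List.pop? st.2.2.1 with
          | some (v, dup') =>
            (st.1 + pvProf it - v, PySem.Set.add st.2.1 (pvCat it), dup',
             max st.2.2.2 (st.1 + pvProf it - v + (((PySem.Set.add st.2.1 (pvCat it)).length : Int)) ^ 2))
          | none => st
        else st)
      (st1.1, st1.2.1, st1.2.2, res0)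
    fin.2.2.2

-- ===== PRECONDITION & SPEC =====
-- Pre_ restricts a positive k to the task's natural domain (the problem statement
-- guarantees 1 <= k <= len(items), and every row has its profit and category):
-- it excludes k > 2*len(items) and short rows A indexes, where A raises IndexError,
-- and also inputs A still returns on: k > len(items) with k <= 2*len(items), where
-- A's range(N-k, N) wraps negative indices and double-counts the k-N largest
-- profits while B caps the selection at all items (neither value is specified),
-- and a positive k with a short row that A's pointers happen never to index,
-- where B raises IndexError too.
def Pre_findMaximumElegance (items : List (List Int)) (k : Int) : Prop :=
  0 < k → ((∀ it ∈ items, 2 ≤ it.length) ∧ k ≤ (items.length : Int))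
instance (items : List (List Int)) (k : Int) : Decidable (Pre_findMaximumElegance items k) := by
  unfold Pre_findMaximumElegance; infer_instance

def pvWitness_findMaximumElegance : List (List Int) × Int := ([[3, 1], [1, 2], [5, 1]], 2)

def Spec_findMaximumElegance (items : List (List Int)) (k : Int) (out : Int) : Prop :=
  out = findMaximumElegance_alt items k
instance (items : List (List Int)) (k : Int) (out : Int) : Decidable (Spec_findMaximumElegance items k out) := by
  unfold Spec_findMaximumElegance; infer_instance

-- ===== CLAIM (what is proved, stated in full; the proofs are below) =====
def Claim_equal_findMaximumElegance : Prop := ∀ (items : List (List Int)) (k : Int), Dom_findMaximumElegance items k → Pre_findMaximumElegance items k → Spec_findMaximumElegance items k (findMaximumElegance items k)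

-- ===== LEMMAS AND PROOFS =====

-- ---- proof-side vocabulary ----

-- number of occurrences of category c in a row list
def pvCnt (c : Int) (l : List (List Int)) : Int := ((l.map pvCat).count c : Int)

-- profits of rows whose category occurs again later (all swappable duplicates, in order)
def pvRemovals : List (List Int) → List Int
  | [] => []
  | it :: r => if pvCat it ∈ r.map pvCat then pvProf it :: pvRemovals r else pvRemovals r

-- profits of first occurrences of categories outside K, in order
def pvAdds : List (List Int) → List Int → List Int
  | [], _ => []
  | it :: r, K => if pvCat it ∈ K then pvAdds r K else pvProf it :: pvAdds r (K ++ [pvCat it])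

-- the common running-max swap pass both programs reduce to
def pvFF : List (Int × Int) → Int → Int → Int → Int
  | [], _, _, res => res
  | p :: ps, n, tot, res =>
    pvFF ps (n + 1) (tot + p.2 - p.1 + 2 * (n + 1) - 1) (max res (tot + p.2 - p.1 + 2 * (n + 1) - 1))

-- A's while loop, re-expressed over the remaining top-k suffix and reversed below-prefix
def pvLoopL : List (List Int) → List (List Int) → PySem.Dict Int Int → Int → Int → Int → Int
  | [], _, _, _, res, _ => res
  | _ :: _, [], _, _, res, _ => res
  | it :: rest, b :: bs, freq, eleg, res, n =>
    if 1 < freq.getD (pvCat it) 0 then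
      match (b :: bs).dropWhile (fun x => freq.contains (pvCat x)) with
      | [] => res
      | jt :: bR' =>
        if freq.getD (pvCat jt) 0 = 0 then
          let eleg' := eleg - pvProf it + pvProf jt + 2 * n + 1
          let freq' := freq.insert (pvCat it) (freq.getD (pvCat it) 0 - 1)
          let freq'' := freq'.insert (pvCat jt) (freq'.getD (pvCat jt) 0 + 1)
          pvLoopL rest bR' freq'' eleg' (max res eleg') (n + 1)
        else pvLoopL rest (jt :: bR') freq eleg res n
    else pvLoopL rest (b :: bs) freq eleg res n

-- coupling invariant between A's Counter and the set K of counted categories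
def pvInv (freq : PySem.Dict Int Int) (K : List Int) (rest : List (List Int)) : Prop :=
  (∀ c, freq.contains c = decide (c ∈ K)) ∧
  (∀ c, freq.getD c 0 = if c ∈ K then max (pvCnt c rest) 1 else 0) ∧
  (∀ it ∈ rest, pvCat it ∈ K)

-- B's stage-1 duplicate stack: profits of rows whose category was seen before (K = already-seen)
def pvDup : List (List Int) → List Int → List Int
  | [], _ => []
  | it :: us, K => if pvCat it ∈ K then pvProf it :: pvDup us K else pvDup us (K ++ [pvCat it])

-- pvRemovals generalized by an extra set K of categories counted as "occurring later"
def pvRemW : List (List Int) → List Int → List Int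
  | [], _ => []
  | it :: r, K => if pvCat it ∈ r.map pvCat ∨ pvCat it ∈ K then pvProf it :: pvRemW r K else pvRemW r K

-- ---- small bridges ----

lemma pvCatA_eq (s : List (List Int)) (i : Int) (h0 : 0 ≤ i) (h1 : i < (s.length : Int)) :
    pvCatA s i = pvCat (s[i.toNat]'(by omega)) := by
  unfold pvCatA pvCat
  rw [PySem.List.pyGetD_eq_getElem s [] h0 h1]

lemma pvProfA_eq (s : List (List Int)) (i : Int) (h0 : 0 ≤ i) (h1 : i < (s.length : Int)) :
    pvProfA s i = pvProf (s[i.toNat]'(by omega)) := by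
  unfold pvProfA pvProf
  rw [PySem.List.pyGetD_eq_getElem s [] h0 h1]

lemma take_reverse_cons (s : List (List Int)) (j : Int) (h0 : 0 ≤ j) (h1 : j < (s.length : Int)) :
    (s.take (j + 1).toNat).reverse = (s[j.toNat]'(by omega)) :: (s.take j.toNat).reverse := by
  have hj : (j + 1).toNat = j.toNat + 1 := by omega
  rw [hj, List.take_add_one, List.getElem?_eq_getElem (by omega : j.toNat < s.length)]
  simp

lemma scan_eq (s : List (List Int)) (freq : PySem.Dict Int Int) :
    ∀ (fl : Nat) (j : Int), j < (s.length : Int) → fl = (j + 1).toNat →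
    pvScanJ s freq fl j ≤ j ∧
    List.dropWhile (fun x => freq.contains (pvCat x)) ((s.take (j + 1).toNat).reverse)
      = (s.take (pvScanJ s freq fl j + 1).toNat).reverse := by
  intro fl
  induction fl with
  | zero =>
    intro j hj hfl
    have : (j + 1).toNat = 0 := hfl.symm
    rw [pvScanJ]
    refine ⟨le_refl _, ?_⟩
    rw [this]
    simp
  | succ fl ih =>
    intro j hj hfl
    have hj0 : 0 ≤ j := by omega
    have hcons := take_reverse_cons s j hj0 hj
    rw [pvScanJ]
    by_cases hc : freq.contains (pvCatA s j)
    · rw [if_pos ⟨hj0, hc⟩]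
      have hfl' : fl = (j - 1 + 1).toNat := by omega
      obtain ⟨ih1, ih2⟩ := ih (j - 1) (by omega) hfl'
      refine ⟨by omega, ?_⟩
      rw [hcons, List.dropWhile_cons, if_pos ?_]
      · have : (j - 1 + 1).toNat = j.toNat := by omega
        rw [this] at ih2
        exact ih2
      · rw [pvCatA_eq s j hj0 hj] at hc
        simpa using hc
    · rw [if_neg (by tauto)]
      refine ⟨le_refl _, ?_⟩
      rw [hcons, List.dropWhile_cons, if_neg ?_, ← hcons]
      rw [pvCatA_eq s j hj0 hj] at hc
      simpa using hc

lemma pvLoopL_small (it : List Int) (rest : List (List Int)) (b : List Int) (bs : List (List Int))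
    (freq : PySem.Dict Int Int) (eleg res n : Int) (hgt : ¬ 1 < freq.getD (pvCat it) 0) :
    pvLoopL (it :: rest) (b :: bs) freq eleg res n = pvLoopL rest (b :: bs) freq eleg res n := by
  rw [pvLoopL, if_neg hgt]

lemma pvLoopL_dw_nil (it : List Int) (rest : List (List Int)) (b : List Int) (bs : List (List Int))
    (freq : PySem.Dict Int Int) (eleg res n : Int) (hgt : 1 < freq.getD (pvCat it) 0)
    (hdw : (b :: bs).dropWhile (fun x => freq.contains (pvCat x)) = []) :
    pvLoopL (it :: rest) (b :: bs) freq eleg res n = res := by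
  rw [pvLoopL, if_pos hgt, hdw]

lemma pvLoopL_swap (it : List Int) (rest : List (List Int)) (b : List Int) (bs : List (List Int))
    (freq : PySem.Dict Int Int) (eleg res n : Int) (hgt : 1 < freq.getD (pvCat it) 0)
    (jt : List Int) (bR' : List (List Int))
    (hdw : (b :: bs).dropWhile (fun x => freq.contains (pvCat x)) = jt :: bR')
    (hz : freq.getD (pvCat jt) 0 = 0) :
    pvLoopL (it :: rest) (b :: bs) freq eleg res n
      = pvLoopL rest bR'
          ((freq.insert (pvCat it) (freq.getD (pvCat it) 0 - 1)).insert (pvCat jt)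
            ((freq.insert (pvCat it) (freq.getD (pvCat it) 0 - 1)).getD (pvCat jt) 0 + 1))
          (eleg - pvProf it + pvProf jt + 2 * n + 1)
          (max res (eleg - pvProf it + pvProf jt + 2 * n + 1)) (n + 1) := by
  rw [pvLoopL, if_pos hgt, hdw]
  simp [hz]

lemma pvLoopL_nz (it : List Int) (rest : List (List Int)) (b : List Int) (bs : List (List Int))
    (freq : PySem.Dict Int Int) (eleg res n : Int) (hgt : 1 < freq.getD (pvCat it) 0)
    (jt : List Int) (bR' : List (List Int))
    (hdw : (b :: bs).dropWhile (fun x => freq.contains (pvCat x)) = jt :: bR')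
    (hz : ¬ freq.getD (pvCat jt) 0 = 0) :
    pvLoopL (it :: rest) (b :: bs) freq eleg res n = pvLoopL rest (jt :: bR') freq eleg res n := by
  rw [pvLoopL, if_pos hgt, hdw]
  simp [hz]

lemma pvCnt_cons (c : Int) (it : List Int) (r : List (List Int)) :
    pvCnt c (it :: r) = pvCnt c r + (if pvCat it = c then 1 else 0) := by
  by_cases h : pvCat it = c
  · simp [pvCnt, h]
  · have h2 : ¬ c = pvCat it := fun e => h e.symm
    simp [pvCnt, h]

lemma pvCnt_pos_iff (c : Int) (l : List (List Int)) : 0 < pvCnt c l ↔ c ∈ l.map pvCat := by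
  simp only [pvCnt]
  exact_mod_cast List.count_pos_iff

lemma pvCnt_eq_zero_of_not_mem {c : Int} {l : List (List Int)} (h : c ∉ l.map pvCat) :
    pvCnt c l = 0 := by
  simp only [pvCnt]
  exact_mod_cast List.count_eq_zero_of_not_mem h

lemma whileA_eq_loopL (s : List (List Int)) :
    ∀ (fuel : Nat) (freq : PySem.Dict Int Int) (eleg res n i j : Int),
    0 ≤ i → i ≤ (s.length : Int) → fuel = ((s.length : Int) - i).toNat → j < i →
    pvWhileA s (s.length : Int) fuel freq eleg res n i j
      = pvLoopL (s.drop i.toNat) ((s.take (j + 1).toNat).reverse) freq eleg res n := by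
  intro fuel
  induction fuel with
  | zero =>
    intro freq eleg res n i j h0 h1 hfuel hj
    rw [pvWhileA]
    have : s.drop i.toNat = [] := by
      apply List.drop_eq_nil_of_le; omega
    rw [this, pvLoopL]
  | succ fuel ih =>
    intro freq eleg res n i j h0 h1 hfuel hj
    have hiN : i < (s.length : Int) := by omega
    have hdrop : s.drop i.toNat = (s[i.toNat]'(by omega)) :: s.drop (i.toNat + 1) :=
      List.drop_eq_getElem_cons (by omega)
    have hi1 : (i + 1).toNat = i.toNat + 1 := by omega
    have hdrop1 : s.drop (i + 1).toNat = s.drop (i.toNat + 1) := by rw [hi1]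
    rw [pvWhileA]
    by_cases hjpos : 0 ≤ j
    case neg =>
      rw [if_neg (by tauto)]
      have h0' : (j + 1).toNat = 0 := by omega
      rw [h0']
      simp only [List.take_zero, List.reverse_nil]
      rw [hdrop, pvLoopL]
    case pos =>
      rw [if_pos ⟨hiN, hjpos⟩]
      have hjlen : j < (s.length : Int) := by omega
      have hcatA : pvCatA s i = pvCat (s[i.toNat]'(by omega)) := pvCatA_eq s i h0 hiN
      have hbcons := take_reverse_cons s j hjpos hjlen
      by_cases hgt : 1 < freq.getD (pvCatA s i) 0
      case neg =>
        rw [if_neg hgt]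
        rw [ih freq eleg res n (i + 1) j (by omega) (by omega) (by omega) (by omega)]
        conv_rhs => rw [hdrop, hbcons]
        rw [pvLoopL_small _ _ _ _ _ _ _ _ (by rw [← hcatA]; exact hgt)]
        rw [← hbcons, hdrop1]
      case pos =>
        rw [if_pos hgt]
        obtain ⟨hs1, hs2⟩ := scan_eq s freq (j + 1).toNat j hjlen rfl
        set j' := pvScanJ s freq (j + 1).toNat j with hj'
        have hdw : List.dropWhile (fun x => freq.contains (pvCat x))
            ((s[j.toNat]'(by omega)) :: (s.take j.toNat).reverse)
            = (s.take (j' + 1).toNat).reverse := by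
          rw [← hbcons]; exact hs2
        by_cases hj'pos : 0 ≤ j'
        case pos =>
          have hj'len : j' < (s.length : Int) := by omega
          have hcatJ : pvCatA s j' = pvCat (s[j'.toNat]'(by omega)) := pvCatA_eq s j' hj'pos hj'len
          have hbcons' := take_reverse_cons s j' hj'pos hj'len
          have hdw' : List.dropWhile (fun x => freq.contains (pvCat x))
              ((s[j.toNat]'(by omega)) :: (s.take j.toNat).reverse)
              = (s[j'.toNat]'(by omega)) :: (s.take j'.toNat).reverse := by
            rw [hdw, hbcons']
          by_cases hz : freq.getD (pvCatA s j') 0 = 0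
          case pos =>
            rw [if_pos ⟨hj'pos, hz⟩]
            rw [ih _ _ _ _ (i + 1) (j' - 1) (by omega) (by omega) (by omega) (by omega)]
            conv_rhs => rw [hdrop, hbcons]
            rw [pvLoopL_swap _ _ _ _ _ _ _ _ (by rw [← hcatA]; exact hgt) _ _ hdw'
              (by rw [← hcatJ]; exact hz)]
            have harith : (j' - 1 + 1).toNat = j'.toNat := by omega
            rw [harith, hcatA, hcatJ, pvProfA_eq s i h0 hiN, pvProfA_eq s j' hj'pos hj'len, hdrop1]
          case neg =>
            rw [if_neg (by tauto)]
            rw [ih _ _ _ _ (i + 1) j' (by omega) (by omega) (by omega) (by omega)]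
            conv_rhs => rw [hdrop, hbcons]
            rw [pvLoopL_nz _ _ _ _ _ _ _ _ (by rw [← hcatA]; exact hgt) _ _ hdw'
              (by rw [← hcatJ]; exact hz)]
            rw [← hbcons', hdrop1]
        case neg =>
          rw [if_neg (by tauto)]
          rw [ih _ _ _ _ (i + 1) j' (by omega) (by omega) (by omega) (by omega)]
          conv_rhs => rw [hdrop, hbcons]
          have hdwnil : List.dropWhile (fun x => freq.contains (pvCat x))
              ((s[j.toNat]'(by omega)) :: (s.take j.toNat).reverse) = [] := by
            rw [hdw]
            have : (j' + 1).toNat = 0 := by omega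
            rw [this]; simp
          rw [pvLoopL_dw_nil _ _ _ _ _ _ _ _ (by rw [← hcatA]; exact hgt) hdwnil]
          have h0' : (j' + 1).toNat = 0 := by omega
          rw [h0']
          simp only [List.take_zero, List.reverse_nil]
          rw [hdrop1]
          cases s.drop (i.toNat + 1) with
          | nil => rw [pvLoopL]
          | cons a l => rw [pvLoopL]

lemma adds_dropWhile_nil (K : List Int) (bR : List (List Int))
    (h : List.dropWhile (fun x => decide (pvCat x ∈ K)) bR = []) : pvAdds bR K = [] := by
  induction bR with
  | nil => rfl
  | cons b bs ih =>
    rw [List.dropWhile_cons] at h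
    by_cases hb : pvCat b ∈ K
    · rw [if_pos (by simpa using hb)] at h
      simp [pvAdds, hb, ih h]
    · rw [if_neg (by simpa using hb)] at h
      simp at h

lemma adds_dropWhile_cons (K : List Int) (bR : List (List Int)) (jt : List Int) (bR' : List (List Int))
    (h : List.dropWhile (fun x => decide (pvCat x ∈ K)) bR = jt :: bR') :
    pvCat jt ∉ K ∧ pvAdds bR K = pvProf jt :: pvAdds bR' (K ++ [pvCat jt]) := by
  induction bR with
  | nil => simp at h
  | cons b bs ih =>
    rw [List.dropWhile_cons] at h
    by_cases hb : pvCat b ∈ K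
    · rw [if_pos (by simpa using hb)] at h
      obtain ⟨h1, h2⟩ := ih h
      exact ⟨h1, by simp [pvAdds, hb, h2]⟩
    · rw [if_neg (by simpa using hb)] at h
      cases h
      exact ⟨hb, by simp [pvAdds, hb]⟩

lemma loopL_eq_ffold :
    ∀ (rest bR : List (List Int)) (freq : PySem.Dict Int Int) (K : List Int) (eleg res n : Int),
    pvInv freq K rest →
    pvLoopL rest bR freq eleg res n = pvFF ((pvRemovals rest).zip (pvAdds bR K)) n eleg res := by
  intro rest
  induction rest with
  | nil => intro bR freq K eleg res n _; cases bR <;> rfl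
  | cons it rest ih =>
    intro bR freq K eleg res n hInv
    obtain ⟨hC, hG, hK⟩ := hInv
    have haK : pvCat it ∈ K := hK it (by simp)
    have hGa : freq.getD (pvCat it) 0 = max (pvCnt (pvCat it) (it :: rest)) 1 := by
      rw [hG, if_pos haK]
    cases bR with
    | nil =>
      rw [pvLoopL.eq_def]
      cases rest <;> simp [pvAdds, pvFF]
    | cons b bs =>
      have hfun : (fun x => freq.contains (pvCat x)) = (fun x => decide (pvCat x ∈ K)) :=
        funext fun x => hC (pvCat x)
      by_cases hin : pvCat it ∈ rest.map pvCat
      case neg =>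
        have hgt : ¬ 1 < freq.getD (pvCat it) 0 := by
          rw [hGa, pvCnt_cons]
          have := pvCnt_eq_zero_of_not_mem hin
          simp [this]
        rw [pvLoopL_small _ _ _ _ _ _ _ _ hgt]
        rw [pvRemovals, if_neg hin]
        apply ih
        refine ⟨hC, ?_, fun x hx => hK x (by simp [hx])⟩
        intro c
        rw [hG]
        by_cases hcK : c ∈ K
        · rw [if_pos hcK, if_pos hcK, pvCnt_cons]
          by_cases hca : pvCat it = c
          · have : pvCnt c rest = 0 := pvCnt_eq_zero_of_not_mem (hca ▸ hin)
            simp [hca, this]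
          · simp [hca]
        · rw [if_neg hcK, if_neg hcK]
      case pos =>
        have hcnt1 : 1 ≤ pvCnt (pvCat it) rest := by
          have := (pvCnt_pos_iff (pvCat it) rest).2 hin
          omega
        have hgt : 1 < freq.getD (pvCat it) 0 := by
          rw [hGa, pvCnt_cons, if_pos rfl]
          rw [max_eq_left (by omega)]
          omega
        rcases hdw : List.dropWhile (fun x => decide (pvCat x ∈ K)) (b :: bs) with _ | ⟨jt, bR'⟩
        case nil =>
          rw [pvLoopL_dw_nil _ _ _ _ _ _ _ _ hgt (by rw [hfun]; exact hdw)]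
          rw [adds_dropWhile_nil K _ hdw]
          simp [pvFF]
        case cons =>
          obtain ⟨hnotK, hAdds⟩ := adds_dropWhile_cons K _ _ _ hdw
          have hz : freq.getD (pvCat jt) 0 = 0 := by rw [hG, if_neg hnotK]
          rw [pvLoopL_swap _ _ _ _ _ _ _ _ hgt _ _ (by rw [hfun]; exact hdw) hz]
          set a := pvCat it
          set bcat := pvCat jt
          have hba : bcat ≠ a := fun h => hnotK (h ▸ haK)
          set freq' := freq.insert a (freq.getD a 0 - 1) with hfreq'
          set freq'' := freq'.insert bcat (freq'.getD bcat 0 + 1) with hfreq''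
          have hG'b : freq'.getD bcat 0 = 0 := by
            rw [hfreq', PySem.Dict.getD_insert, if_neg hba, hz]
          have hInv'' : pvInv freq'' (K ++ [bcat]) rest := by
            refine ⟨?_, ?_, fun x hx => by simp [hK x (by simp [hx])]⟩
            · intro c
              rw [hfreq'', PySem.Dict.contains_insert, hfreq', PySem.Dict.contains_insert, hC]
              by_cases hcb : c = bcat
              · simp [hcb]
              · have h1 : (c == bcat) = false := beq_eq_false_iff_ne.2 hcb
                rw [h1]
                by_cases hca : c = a
                · have h2 : (c == a) = true := beq_iff_eq.2 hca
                  rw [h2]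
                  simp [hca, haK]
                · have h2 : (c == a) = false := beq_eq_false_iff_ne.2 hca
                  rw [h2]
                  simp
                  exact fun h => absurd h hcb
            · intro c
              rw [hfreq'', PySem.Dict.getD_insert]
              by_cases hcb : c = bcat
              · have hcnt0 : pvCnt bcat rest = 0 := by
                  apply pvCnt_eq_zero_of_not_mem
                  intro hmem
                  rcases List.mem_map.1 hmem with ⟨x, hx, hxe⟩
                  exact hnotK (hxe ▸ hK x (by simp [hx]))
                subst hcb
                rw [if_pos rfl, hG'b, if_pos (by simp), hcnt0]
                simp
              · rw [if_neg hcb, hfreq', PySem.Dict.getD_insert]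
                by_cases hca : c = a
                · subst hca
                  rw [if_pos rfl, hGa, pvCnt_cons, if_pos rfl]
                  rw [max_eq_left (by omega), if_pos (by simp [haK]), max_eq_left (by omega)]
                  ring
                · rw [if_neg hca, hG]
                  have hmem : c ∈ K ++ [bcat] ↔ c ∈ K := by simp [hcb]
                  by_cases hcK : c ∈ K
                  · rw [if_pos hcK, if_pos (hmem.2 hcK), pvCnt_cons,
                      if_neg (fun h => hca h.symm), add_zero]
                  · rw [if_neg hcK, if_neg (fun h => hcK (hmem.1 h))]
          rw [ih _ _ _ _ _ _ hInv'']
          rw [pvRemovals, if_pos hin, hAdds]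
          simp only [List.zip_cons_cons]
          rw [pvFF]
          have : eleg + pvProf jt - pvProf it + 2 * (n + 1) - 1
              = eleg - pvProf it + pvProf jt + 2 * n + 1 := by ring
          rw [this]

lemma inv_init (topk : List (List Int)) :
    pvInv (PySem.Dict.counter (topk.map pvCat)) (PySem.Set.ofList (topk.map pvCat)) topk := by
  refine ⟨?_, ?_, ?_⟩
  · intro c
    rw [PySem.Dict.contains_counter]
    simp [PySem.Set.mem_ofList]
  · intro c
    rw [PySem.Dict.getD_counter]
    by_cases hc : c ∈ PySem.Set.ofList (topk.map pvCat)
    · rw [if_pos hc]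
      have hm : c ∈ topk.map pvCat := (PySem.Set.mem_ofList _ _).1 hc
      have hpos : 0 < (topk.map pvCat).count c := List.count_pos_iff.2 hm
      have h1 : (1 : Int) ≤ pvCnt c topk := by
        simp only [pvCnt]; exact_mod_cast hpos
      rw [max_eq_left h1]; rfl
    · rw [if_neg hc]
      have hm : c ∉ topk.map pvCat := fun h => hc ((PySem.Set.mem_ofList _ _).2 h)
      simp [List.count_eq_zero_of_not_mem hm]
  · intro it hit
    exact (PySem.Set.mem_ofList _ _).2 (List.mem_map_of_mem hit)

-- ---- B-side bridges ----

lemma pvDup_congr : ∀ (u : List (List Int)) (K K' : List Int),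
    (∀ c, c ∈ K ↔ c ∈ K') → pvDup u K = pvDup u K' := by
  intro u
  induction u with
  | nil => intro K K' _; rfl
  | cons it us ih =>
    intro K K' h
    rw [pvDup, pvDup]
    by_cases hm : pvCat it ∈ K
    · rw [if_pos hm, if_pos ((h _).1 hm), ih K K' h]
    · rw [if_neg hm, if_neg (fun hx => hm ((h _).2 hx))]
      exact ih _ _ (fun c => by simp [h c])

lemma pvAdds_congr : ∀ (bR : List (List Int)) (K K' : List Int),
    (∀ c, c ∈ K ↔ c ∈ K') → pvAdds bR K = pvAdds bR K' := by
  intro bR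
  induction bR with
  | nil => intro K K' _; rfl
  | cons b bs ih =>
    intro K K' h
    rw [pvAdds, pvAdds]
    by_cases hm : pvCat b ∈ K
    · rw [if_pos hm, if_pos ((h _).1 hm), ih K K' h]
    · rw [if_neg hm, if_neg (fun hx => hm ((h _).2 hx))]
      rw [ih (K ++ [pvCat b]) (K' ++ [pvCat b]) (fun c => by simp [h c])]

lemma pvRemW_nil_eq : ∀ (l : List (List Int)), pvRemW l [] = pvRemovals l := by
  intro l
  induction l with
  | nil => rfl
  | cons it r ih =>
    rw [pvRemW, pvRemovals]
    by_cases hm : pvCat it ∈ r.map pvCat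
    · rw [if_pos (Or.inl hm), if_pos hm, ih]
    · rw [if_neg (by simp [hm]), if_neg hm, ih]

lemma pvRemW_append : ∀ (l : List (List Int)) (it : List Int) (K : List Int),
    pvRemW (l ++ [it]) K
      = pvRemW l (pvCat it :: K) ++ (if pvCat it ∈ K then [pvProf it] else []) := by
  intro l
  induction l with
  | nil =>
    intro it K
    by_cases hm : pvCat it ∈ K
    · simp [pvRemW, hm]
    · simp [pvRemW, hm]
  | cons x xs ih =>
    intro it K
    rw [List.cons_append, pvRemW, pvRemW, ih]
    have hcond : (pvCat x ∈ (xs ++ [it]).map pvCat ∨ pvCat x ∈ K)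
        ↔ (pvCat x ∈ xs.map pvCat ∨ pvCat x ∈ pvCat it :: K) := by
      simp [List.mem_append]
      exact or_assoc
    by_cases hm : pvCat x ∈ xs.map pvCat ∨ pvCat x ∈ pvCat it :: K
    · rw [if_pos (hcond.2 hm), if_pos hm, List.cons_append]
    · rw [if_neg (fun hx => hm (hcond.1 hx)), if_neg hm]

lemma pvDup_eq_remW : ∀ (u : List (List Int)) (K : List Int),
    pvDup u K = (pvRemW u.reverse K).reverse := by
  intro u
  induction u with
  | nil => intro K; rfl
  | cons it us ih =>
    intro K
    rw [pvDup, List.reverse_cons, pvRemW_append, List.reverse_append]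
    by_cases hm : pvCat it ∈ K
    · rw [if_pos hm, if_pos hm]
      simp only [List.reverse_cons, List.reverse_nil, List.nil_append, List.singleton_append]
      rw [← ih, pvDup_congr us (pvCat it :: K) K (fun c => by simp; intro h; subst h; exact hm)]
    · rw [if_neg hm, if_neg hm]
      simp only [List.reverse_nil, List.nil_append]
      rw [← ih, pvDup_congr us (pvCat it :: K) (K ++ [pvCat it]) (fun c => by simp; tauto)]

lemma stage1_bridge : ∀ (u : List (List Int)) (tot : Int) (S : PySem.Set Int) (dup : List Int),
    u.foldl
      (fun (st : Int × PySem.Set Int × List Int) it =>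
        if PySem.Set.contains st.2.1 (pvCat it) then
          (st.1 + pvProf it, st.2.1, st.2.2 ++ [pvProf it])
        else (st.1 + pvProf it, PySem.Set.add st.2.1 (pvCat it), st.2.2))
      (tot, S, dup)
    = (tot + (u.map pvProf).sum, PySem.Set.update S (u.map pvCat), dup ++ pvDup u S) := by
  intro u
  induction u with
  | nil => intro tot S dup; simp [pvDup, PySem.Set.update]
  | cons it us ih =>
    intro tot S dup
    simp only [List.foldl_cons, List.map_cons, List.sum_cons]
    by_cases hm : pvCat it ∈ S
    · rw [if_pos ((PySem.Set.contains_iff S (pvCat it)).2 hm)]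
      rw [ih]
      have hupd : PySem.Set.update S (pvCat it :: us.map pvCat)
          = PySem.Set.update S (us.map pvCat) := by
        simp only [PySem.Set.update, List.foldl_cons]
        rw [PySem.Set.add, if_pos ((PySem.Set.contains_iff S (pvCat it)).2 hm)]
      rw [hupd, pvDup, if_pos hm]
      refine Prod.ext (by dsimp; ring) (Prod.ext rfl ?_)
      dsimp
      rw [List.append_assoc, List.singleton_append]
    · rw [if_neg (by
        intro hc
        exact hm ((PySem.Set.contains_iff S (pvCat it)).1 hc))]
      rw [ih]
      have hupd : PySem.Set.update S (pvCat it :: us.map pvCat)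
          = PySem.Set.update (PySem.Set.add S (pvCat it)) (us.map pvCat) := by
        simp [PySem.Set.update]
      rw [hupd, pvDup, if_neg hm]
      refine Prod.ext (by dsimp; ring) (Prod.ext rfl ?_)
      dsimp
      rw [pvDup_congr us (S ++ [pvCat it]) (PySem.Set.add S (pvCat it))
        (fun c => by rw [PySem.Set.add_of_not_mem hm])]

lemma stage2_bridge : ∀ (bR : List (List Int)) (r : List Int) (S : PySem.Set Int) (tot res : Int),
    (bR.foldl
      (fun (st : Int × PySem.Set Int × List Int × Int) it =>
        if ¬ PySem.Set.contains st.2.1 (pvCat it) ∧ st.2.2.1 ≠ [] then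
          match PySem.List.pop? st.2.2.1 with
          | some (v, dup') =>
            (st.1 + pvProf it - v, PySem.Set.add st.2.1 (pvCat it), dup',
             max st.2.2.2 (st.1 + pvProf it - v + (((PySem.Set.add st.2.1 (pvCat it)).length : Int)) ^ 2))
          | none => st
        else st)
      (tot, S, r.reverse, res)).2.2.2
    = pvFF (r.zip (pvAdds bR S)) (S.length : Int) (tot + (S.length : Int) ^ 2) res := by
  intro bR
  induction bR with
  | nil => intro r S tot res; simp [pvAdds, pvFF]
  | cons b bs ih =>
    intro r S tot res
    simp only [List.foldl_cons]
    by_cases hm : pvCat b ∈ S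
    · rw [if_neg (by
        rintro ⟨hnc, -⟩
        exact hnc ((PySem.Set.contains_iff S (pvCat b)).2 hm))]
      rw [ih, pvAdds, if_pos hm]
    · have hnc : ¬ PySem.Set.contains S (pvCat b) = true := by
        intro hc; exact hm ((PySem.Set.contains_iff S (pvCat b)).1 hc)
      cases r with
      | nil =>
        rw [if_neg (by rintro ⟨-, hne⟩; exact hne (by simp))]
        rw [ih [] S tot res]
        rw [pvAdds, if_neg hm]
        simp [pvFF]
      | cons rh rt =>
        rw [if_pos ⟨hnc, by simp⟩]
        rw [show (rh :: rt).reverse = rt.reverse ++ [rh] from by simp]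
        rw [PySem.List.pop?_last]
        have hadd : PySem.Set.add S (pvCat b) = S ++ [pvCat b] := PySem.Set.add_of_not_mem hm
        have hlen : (((PySem.Set.add S (pvCat b)).length : Int)) = (S.length : Int) + 1 := by
          rw [hadd]; simp
        rw [ih rt (PySem.Set.add S (pvCat b)) (tot + pvProf b - rh)
          (max res (tot + pvProf b - rh + (((PySem.Set.add S (pvCat b)).length : Int)) ^ 2))]
        rw [pvAdds, if_neg hm]
        simp only [List.zip_cons_cons, pvFF]
        rw [pvAdds_congr bs (PySem.Set.add S (pvCat b)) (S ++ [pvCat b]) (fun c => by rw [hadd]),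
          hlen]
        have h1 : tot + pvProf b - rh + ((S.length : Int) + 1) ^ 2
            = tot + (S.length : Int) ^ 2 + pvProf b - rh + 2 * ((S.length : Int) + 1) - 1 := by
          ring
        rw [h1]

lemma size_counter (xs : List Int) :
    (PySem.Dict.counter xs).size = (PySem.Set.ofList xs).length := by
  have := PySem.Dict.items_counter xs
  simp [PySem.Dict.size, this]

-- ===== VERDICT (by name: the statement is the Claim_ definition above) =====
theorem findMaximumElegance_spec : Claim_equal_findMaximumElegance := by
  unfold Claim_equal_findMaximumElegance
  intro items k hdom hpre
  unfold Spec_findMaximumElegance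
  simp only [findMaximumElegance, findMaximumElegance_alt]
  set s := PySem.List.sorted items (fun x => x) false with hsdef
  have hslen : (s.length : Int) = (items.length : Int) := by
    rw [hsdef, PySem.List.length_sorted]
  by_cases hk : k ≤ 0
  · rw [if_pos hk]
    rw [PySem.List.pyRange_one_eq_nil (by omega)]
    simp only [List.foldl_nil]
    rw [show ((s.length : Int) - ((s.length : Int) - k)).toNat = 0 from by omega]
    rw [pvWhileA]
    norm_num [PySem.Dict.size_empty]
  · rw [if_neg hk]
    have hkN : k ≤ (s.length : Int) := by
      have := (hpre (by omega)).2
      omega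
    -- ---- A side ----
    simp only [pvProfA, pvCatA]
    rw [PySem.List.foldl_pyRange_pyGetD' s []
        (fun (st : Int × PySem.Dict Int Int) row =>
          (st.1 + PySem.List.pyGetD row 0 0,
           st.2.insert (PySem.List.pyGetD row 1 0) (st.2.getD (PySem.List.pyGetD row 1 0) 0 + 1)))
        ((0 : Int), (PySem.Dict.empty : PySem.Dict Int Int))
        (by omega : (0:Int) ≤ (s.length : Int) - k)]
    rw [PySem.List.foldl_prod_mk
        (fun (x : Int) (row : List Int) => x + PySem.List.pyGetD row 0 0)
        (fun (d : PySem.Dict Int Int) (row : List Int) =>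
          d.insert (PySem.List.pyGetD row 1 0) (d.getD (PySem.List.pyGetD row 1 0) 0 + 1))
        _ 0 PySem.Dict.empty]
    dsimp only
    rw [PySem.List.foldl_add _ (fun row => PySem.List.pyGetD row 0 0) 0, zero_add]
    rw [show (List.foldl
          (fun (d : PySem.Dict Int Int) (row : List Int) =>
            d.insert (PySem.List.pyGetD row 1 0) (d.getD (PySem.List.pyGetD row 1 0) 0 + 1))
          PySem.Dict.empty (List.drop ((s.length : Int) - k).toNat s))
        = List.foldl (fun (d : PySem.Dict Int Int) x => d.insert x (d.getD x 0 + 1))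
            PySem.Dict.empty
            ((List.drop ((s.length : Int) - k).toNat s).map
              (fun (row : List Int) => PySem.List.pyGetD row 1 0)) from by
      rw [List.foldl_map]]
    rw [PySem.Dict.foldl_insert_getD_add_one_eq_counter]
    rw [show (fun (row : List Int) => PySem.List.pyGetD row 1 0) = pvCat from rfl]
    rw [show (fun (row : List Int) => PySem.List.pyGetD row 0 0) = pvProf from rfl]
    rw [size_counter]
    set m := ((s.length : Int) - k).toNat with hm
    set topk := s.drop m with htopk
    set below := s.take m with hbelow
    set cats := topk.map pvCat with hcats
    set d0 : Int := ((PySem.Set.ofList cats).length : Int) with hd0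
    rw [whileA_eq_loopL s _ _ _ _ _ ((s.length : Int) - k) ((s.length : Int) - k - 1)
        (by omega) (by omega) rfl (by omega)]
    rw [show ((s.length : Int) - k - 1 + 1).toNat = m from by omega]
    rw [loopL_eq_ffold _ _ _ (PySem.Set.ofList cats) _ _ _ (by rw [hcats]; exact inv_init topk)]
    -- ---- B side ----
    rw [PySem.List.slice_to s.reverse (by omega : (0:Int) ≤ k)]
    rw [PySem.List.slice_from s.reverse (by omega : (0:Int) ≤ k)]
    rw [List.take_reverse, List.drop_reverse]
    rw [show s.length - k.toNat = m from by omega]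
    rw [← htopk, ← hbelow]
    rw [stage1_bridge]
    dsimp only
    rw [zero_add, List.nil_append]
    have hU : PySem.Set.update PySem.Set.empty ((topk.reverse).map pvCat)
        = PySem.Set.ofList (cats.reverse) := by
      rw [PySem.Set.ofList_eq_foldl, hcats, ← List.map_reverse]
      rfl
    rw [hU]
    have hdup : pvDup topk.reverse PySem.Set.empty = (pvRemovals topk).reverse := by
      rw [pvDup_eq_remW, List.reverse_reverse]
      exact congrArg List.reverse (pvRemW_nil_eq topk)
    rw [hdup]
    rw [stage2_bridge below.reverse (pvRemovals topk) (PySem.Set.ofList cats.reverse)]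
    have hmemeq : ∀ c, c ∈ PySem.Set.ofList cats.reverse ↔ c ∈ PySem.Set.ofList cats := by
      intro c
      rw [PySem.Set.mem_ofList, PySem.Set.mem_ofList, List.mem_reverse]
    have hleneq : (PySem.Set.ofList cats.reverse).length = (PySem.Set.ofList cats).length := by
      exact ((List.perm_ext_iff_of_nodup (PySem.Set.nodup_ofList _)
        (PySem.Set.nodup_ofList _)).2 hmemeq).length_eq
    rw [pvAdds_congr below.reverse _ _ hmemeq, hleneq]
    rw [show ((topk.reverse).map pvProf).sum = ((topk).map pvProf).sum from by
      rw [List.map_reverse, List.sum_reverse]]
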